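-- pv_equiv track=rewrite | github.com/yoshility/mtrths_labo | test_time_scaling/main.py | check_is_correct
-- ===== SOURCE A (Python) =====
-- def check_is_correct(gt, pred):
--     # put ',' in gt (e.g. 488000 -> 488,000)
--     i = len(gt)-1
--     cnt = 0
--     new_gt = ""
--     while i >= 0:
--         if cnt != 0 and cnt % 3 == 0:
--             new_gt = ',' + new_gt
--         new_gt = gt[i] + new_gt
--         cnt += 1
--         i -= 1
--
--     # get final sentence from answer
--     new_pred = pred.split('\n\n')[-1]
--
--     return int(new_gt in new_pred or gt in new_pred)
-- ===== SOURCE B (Python) =====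
-- def check_is_correct(gt, pred):
--     # group gt into 3-char chunks from the right and join with ','
--     parts = [gt[max(0, i - 3):i] for i in range(len(gt), 0, -3)]
--     new_gt = ','.join(reversed(parts))
--
--     # get final sentence from answer
--     new_pred = pred.split('\n\n')[-1]
--
--     return int(new_gt in new_pred or gt in new_pred)
-- ===== Notes on version B (the rewrite author's own statement) =====
-- stated objective: simpler
-- what changed: A builds the comma-grouped string one character at a time right-to-left with a modular counter and repeated string prepends; B slices gt into 3-character chunks from the right (range(len,0,-3)) and joins them once with ','.
import Mathlib
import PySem

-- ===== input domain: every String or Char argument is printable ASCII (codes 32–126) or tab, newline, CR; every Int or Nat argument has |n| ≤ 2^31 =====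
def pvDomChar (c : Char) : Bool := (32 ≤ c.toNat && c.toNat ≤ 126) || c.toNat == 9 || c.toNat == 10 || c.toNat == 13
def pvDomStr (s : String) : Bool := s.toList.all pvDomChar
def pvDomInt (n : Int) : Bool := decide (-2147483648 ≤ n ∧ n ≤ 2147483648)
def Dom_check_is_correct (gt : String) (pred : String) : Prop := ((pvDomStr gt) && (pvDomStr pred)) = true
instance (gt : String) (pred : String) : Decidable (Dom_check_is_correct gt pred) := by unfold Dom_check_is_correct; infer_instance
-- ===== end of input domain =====

-- B replaces A's per-character while-loop with modular counter by slicing gt into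
-- 3-character chunks from the right and joining them with ','; same return value (simpler decomposition).

-- ===== PORT A =====
-- the while loop: processes gt's characters from the last to the first; cnt counts processed chars
def pvLoopA : List Char → Nat → List Char → List Char
  | [], _, acc => acc
  | c :: rest, cnt, acc =>
      pvLoopA rest (cnt + 1) (if cnt ≠ 0 ∧ cnt % 3 = 0 then c :: ',' :: acc else c :: acc)

def check_is_correct (gt : String) (pred : String) : Int :=
  let new_gt : List Char := pvLoopA gt.toList.reverse 0 []
  let new_pred : String := PySem.List.pyGetD ((PySem.Str.split? pred "\n\n").getD []) (-1) ""
  if PySem.Chars.isIn new_gt new_pred.toList || PySem.Str.isIn gt new_pred then 1 else 0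

-- ===== PORT B =====
-- gt[max(0, i-3):i]
def pvChunk (cs : List Char) (i : Int) : List Char :=
  PySem.Chars.slice cs (some (max 0 (i - 3))) (some i)

def check_is_correct_alt (gt : String) (pred : String) : Int :=
  let parts : List (List Char) :=
    (PySem.List.pyRange (PySem.Str.len gt) 0 (-3)).map (pvChunk gt.toList)
  let new_gt : List Char := PySem.Chars.join [','] parts.reverse
  let new_pred : String := PySem.List.pyGetD ((PySem.Str.split? pred "\n\n").getD []) (-1) ""
  if PySem.Chars.isIn new_gt new_pred.toList || PySem.Str.isIn gt new_pred then 1 else 0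

-- ===== PRECONDITION & SPEC =====
def Spec_check_is_correct (gt : String) (pred : String) (out : Int) : Prop := out = check_is_correct_alt gt pred
instance (gt : String) (pred : String) (out : Int) : Decidable (Spec_check_is_correct gt pred out) := by unfold Spec_check_is_correct; infer_instance

-- ===== CLAIM (what is proved, stated in full; the proofs are below) =====
def Claim_equal_check_is_correct : Prop := ∀ (gt : String) (pred : String), Dom_check_is_correct gt pred → Spec_check_is_correct gt pred (check_is_correct gt pred)

-- ===== LEMMAS AND PROOFS =====

-- after the first step cnt never returns to 0, so only cnt % 3 matters
lemma pvLoopA_cnt (r : List Char) : ∀ (c1 c2 : Nat) (acc : List Char),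
    0 < c1 → 0 < c2 → c1 % 3 = c2 % 3 → pvLoopA r c1 acc = pvLoopA r c2 acc := by
  induction r with
  | nil => intro c1 c2 acc _ _ _; simp [pvLoopA]
  | cons c rest ih =>
      intro c1 c2 acc h1 h2 hm
      simp only [pvLoopA]
      have hcond : (c1 ≠ 0 ∧ c1 % 3 = 0) ↔ (c2 ≠ 0 ∧ c2 % 3 = 0) := by omega
      by_cases h : c1 ≠ 0 ∧ c1 % 3 = 0
      · rw [if_pos h, if_pos (hcond.mp h)]; exact ih _ _ _ (by omega) (by omega) (by omega)
      · rw [if_neg h, if_neg (fun hc => h (hcond.mpr hc))]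
        exact ih _ _ _ (by omega) (by omega) (by omega)

-- at most three characters: no comma is ever inserted
lemma pvLoopA_short (r : List Char) (acc : List Char) (h : r.length ≤ 3) :
    pvLoopA r 0 acc = r.reverse ++ acc := by
  rcases r with _ | ⟨a, _ | ⟨b, _ | ⟨c, _ | ⟨d, t⟩⟩⟩⟩
  · simp [pvLoopA]
  · simp [pvLoopA]
  · simp [pvLoopA]
  · simp [pvLoopA]
  · simp at h; omega

-- one group of three followed by at least one more character: emit the group then a comma
lemma pvLoopA_step (r2 rest acc : List Char) (h2 : r2.length = 3) (hne : rest ≠ []) :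
    pvLoopA (r2 ++ rest) 0 acc = pvLoopA rest 0 (',' :: r2.reverse ++ acc) := by
  rcases r2 with _ | ⟨a, _ | ⟨b, _ | ⟨c, _ | ⟨d, t⟩⟩⟩⟩ <;> simp at h2
  rcases rest with _ | ⟨d, t⟩
  · exact absurd rfl hne
  · simp only [pvLoopA, List.cons_append, List.nil_append]
    norm_num
    have := pvLoopA_cnt t 4 1 (d :: ',' :: c :: b :: a :: acc) (by omega) (by omega) (by omega)
    simpa using this

-- ','.join over a non-empty list with one more chunk appended
lemma join_append_singleton (sep : List Char) (xs : List (List Char)) (y : List Char)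
    (h : xs ≠ []) : PySem.Chars.join sep (xs ++ [y]) = PySem.Chars.join sep xs ++ sep ++ y := by
  induction xs with
  | nil => exact absurd rfl h
  | cons p ps ih =>
      rcases ps with _ | ⟨q, qs⟩
      · simp [PySem.Chars.join_cons_cons, PySem.Chars.join_singleton]
      · rw [show (p :: q :: qs) ++ [y] = p :: q :: (qs ++ [y]) by simp,
            PySem.Chars.join_cons_cons,
            show (q :: (qs ++ [y])) = (q :: qs) ++ [y] by simp,
            ih (by simp), PySem.Chars.join_cons_cons]
        simp

-- range(m, 0, -3) for 0 < m ≤ 3 is [m]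
lemma pyRange_neg3_last (m : Nat) (h0 : 0 < m) (h3 : m ≤ 3) :
    PySem.List.pyRange (m : Int) 0 (-3) = [(m : Int)] := by
  simp only [PySem.List.pyRange]
  norm_num
  have hc : (((m : Int) + 3 - 1) / 3).toNat = 1 := by
    have : ((m : Int) + 3 - 1) / 3 = 1 := by omega
    omega
  rw [if_pos h0, hc]
  simp [List.range_succ]

-- range(m, 0, -3) for m > 3 starts with m and continues as range(m-3, 0, -3)
lemma pyRange_neg3_cons (m : Nat) (h : 3 < m) :
    PySem.List.pyRange (m : Int) 0 (-3) = (m : Int) :: PySem.List.pyRange ((m : Int) - 3) 0 (-3) := by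
  simp only [PySem.List.pyRange]
  norm_num
  have hc1 : (((m : Int) + 3 - 1) / 3).toNat = (((m : Int) - 1) / 3).toNat + 1 := by
    have h1 : ((m : Int) + 3 - 1) / 3 = ((m : Int) - 1) / 3 + 1 := by omega
    have h2 : (0 : Int) ≤ ((m : Int) - 1) / 3 := Int.ediv_nonneg (by omega) (by omega)
    omega
  rw [if_pos (by omega : 0 < m), if_pos h, hc1, List.range_succ_eq_map]
  simp [Function.comp_def]
  intro k _
  omega

lemma pyRange_neg3_ne_nil (m : Nat) (h0 : 0 < m) :
    PySem.List.pyRange (m : Int) 0 (-3) ≠ [] := by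
  by_cases h3 : m ≤ 3
  · rw [pyRange_neg3_last m h0 h3]; simp
  · rw [pyRange_neg3_cons m (by omega)]; simp

-- main invariant: A's loop on the reversed first m characters equals B's joined chunks for range(m,0,-3)
lemma loop_eq_join (m : Nat) : ∀ (cs : List Char) (acc : List Char), m ≤ cs.length →
    pvLoopA ((cs.take m).reverse) 0 acc
      = PySem.Chars.join [','] (((PySem.List.pyRange (m : Int) 0 (-3)).map (pvChunk cs)).reverse) ++ acc := by
  induction m using Nat.strong_induction_on with
  | _ m ih =>
    intro cs acc hm
    rcases Nat.eq_zero_or_pos m with h0 | h0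
    · subst h0
      simp [pvLoopA, show PySem.List.pyRange (0 : Int) 0 (-3) = [] from rfl,
        PySem.Chars.join, List.intercalate]
    by_cases h3 : m ≤ 3
    · -- a single chunk, no comma
      rw [pvLoopA_short _ _ (by simp; omega), pyRange_neg3_last m h0 h3]
      have hch : pvChunk cs (m : Int) = cs.take m := by
        have hmax : max (0 : Int) ((m : Int) - 3) = 0 := by omega
        simp [pvChunk, hmax, PySem.List.slice_to cs (by omega : (0:Int) ≤ (m : Int))]
      simp [hch, PySem.Chars.join_singleton]
    · -- m > 3: peel the rightmost 3-character chunk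
      have h3' : 3 < m := by omega
      have htake : cs.take m = cs.take (m - 3) ++ (cs.drop (m - 3)).take 3 := by
        conv_lhs => rw [show m = (m - 3) + 3 by omega, List.take_add]
      have hq : ((cs.drop (m - 3)).take 3).length = 3 := by
        rw [List.length_take, List.length_drop]; omega
      have hp : (cs.take (m - 3)).reverse ≠ [] := by
        have hl : (cs.take (m - 3)).length = m - 3 := by rw [List.length_take]; omega
        intro heq
        have hlen := congrArg List.length heq
        simp [hl] at hlen
        omega
      rw [htake, List.reverse_append, pvLoopA_step _ _ _ (by simpa using hq) hp]
      have hcast : ((m - 3 : Nat) : Int) = (m : Int) - 3 := by omega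
      rw [ih (m - 3) (by omega) cs (',' :: ((cs.drop (m - 3)).take 3).reverse.reverse ++ acc)
            (by omega)]
      rw [pyRange_neg3_cons m h3', ← hcast]
      rw [List.map_cons, List.reverse_cons,
          join_append_singleton [','] _ _ (by
            simp [pyRange_neg3_ne_nil (m - 3) (by omega)])]
      have hch : pvChunk cs (m : Int) = (cs.drop (m - 3)).take 3 := by
        have hmax : max (0 : Int) ((m : Int) - 3) = ((m - 3 : Nat) : Int) := by omega
        simp only [pvChunk, hmax, PySem.Chars.slice_eq_listSlice, PySem.List.slice_natCast]
        congr 1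
        omega
      simp [hch]

-- the two ports build the same new_gt string
lemma new_gt_eq (gt : String) :
    pvLoopA gt.toList.reverse 0 []
      = PySem.Chars.join [','] (((PySem.List.pyRange (PySem.Str.len gt) 0 (-3)).map (pvChunk gt.toList)).reverse) := by
  have h := loop_eq_join gt.toList.length gt.toList [] (le_refl _)
  simp only [List.take_length, List.append_nil] at h
  rw [h]
  simp [PySem.Str.len_eq]

-- ===== VERDICT (by name: the statement is the Claim_ definition above) =====
theorem check_is_correct_spec : Claim_equal_check_is_correct := by
  intro gt pred _
  unfold Spec_check_is_correct check_is_correct check_is_correct_alt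
  rw [new_gt_eq gt]
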